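-- pv_equiv track=rewrite | github.com/zeattacker/OpenViking | openviking/storage/vectordb_adapters/vikingdb_private_adapter.py | _sanitize_scalar_index_fields
-- ===== SOURCE A (Python) =====
-- from typing import Any, Dict, Optional
--
-- def _sanitize_scalar_index_fields(
--
--     scalar_index_fields: list[str],
--     fields_meta: list[dict[str, Any]],
-- ) -> list[str]:
--     date_time_fields = {
--         field.get("FieldName") for field in fields_meta if field.get("FieldType") == "date_time"
--     }
--     return [field for field in scalar_index_fields if field not in date_time_fields]
-- ===== SOURCE B (Python) =====
-- def _sanitize_scalar_index_fields(
--     scalar_index_fields: list[str],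
--     fields_meta: list[dict],
-- ) -> list[str]:
--     result = list(scalar_index_fields)
--     for meta in fields_meta:
--         if meta.get("FieldType") == "date_time":
--             name = meta.get("FieldName")
--             result = [f for f in result if f != name]
--     return result
-- ===== Notes on version B (the rewrite author's own statement) =====
-- stated objective: alternative
-- what changed: Inverts the loop structure: instead of precomputing a set of date_time names and filter-testing each field against it, B iterates over fields_meta as the outer loop and successively prunes every date_time name out of a working copy of the field list.
import Mathlib
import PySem

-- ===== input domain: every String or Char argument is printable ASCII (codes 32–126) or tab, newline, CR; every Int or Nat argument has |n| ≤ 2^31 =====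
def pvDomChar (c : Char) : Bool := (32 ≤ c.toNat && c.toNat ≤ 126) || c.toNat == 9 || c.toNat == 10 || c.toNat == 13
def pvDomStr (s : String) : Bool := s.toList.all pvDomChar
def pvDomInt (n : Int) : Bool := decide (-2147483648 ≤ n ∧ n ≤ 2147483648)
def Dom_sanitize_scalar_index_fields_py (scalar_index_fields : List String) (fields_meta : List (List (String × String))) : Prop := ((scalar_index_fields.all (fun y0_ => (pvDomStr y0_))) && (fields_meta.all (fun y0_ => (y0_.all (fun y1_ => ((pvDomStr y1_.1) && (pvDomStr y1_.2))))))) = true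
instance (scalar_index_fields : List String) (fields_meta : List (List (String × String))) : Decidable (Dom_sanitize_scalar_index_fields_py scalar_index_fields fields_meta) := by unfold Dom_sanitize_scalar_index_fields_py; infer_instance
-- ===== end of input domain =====

-- B inverts the loop structure: the outer loop runs over fields_meta and each date_time entry prunes its name out of a working copy of the field list (alternative decomposition; not faster).


-- ===== PORT A =====
-- dict.get(k): first-match lookup in the association list (the fixed dict convention)
def pvGet (m : List (String × String)) (k : String) : Option String :=
  (m.find? (fun kv => kv.1 == k)).map (·.2)
def sanitize_scalar_index_fields_py (scalar_index_fields : List String) (fields_meta : List (List (String × String))) : List String :=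
  let date_time_fields : PySem.Set (Option String) :=
    PySem.Set.ofList
      ((fields_meta.filter (fun field => pvGet field "FieldType" == some "date_time")).map
        (fun field => pvGet field "FieldName"))
  scalar_index_fields.filter (fun field => !(PySem.Set.contains date_time_fields (some field)))

-- ===== PORT B =====
def sanitize_scalar_index_fields_py_alt (scalar_index_fields : List String) (fields_meta : List (List (String × String))) : List String :=
  fields_meta.foldl
    (fun result mrec =>
      if pvGet mrec "FieldType" == some "date_time" then
        let name := pvGet mrec "FieldName"
        result.filter (fun f => !(some f == name))
      else result)
    scalar_index_fields

-- ===== PRECONDITION & SPEC =====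
def Spec_sanitize_scalar_index_fields_py (scalar_index_fields : List String) (fields_meta : List (List (String × String))) (out : List String) : Prop := out = sanitize_scalar_index_fields_py_alt scalar_index_fields fields_meta
instance (scalar_index_fields : List String) (fields_meta : List (List (String × String))) (out : List String) : Decidable (Spec_sanitize_scalar_index_fields_py scalar_index_fields fields_meta out) := by unfold Spec_sanitize_scalar_index_fields_py; infer_instance

-- ===== CLAIM (what is proved, stated in full; the proofs are below) =====
def Claim_equal_sanitize_scalar_index_fields_py : Prop := ∀ (scalar_index_fields : List String) (fields_meta : List (List (String × String))), Dom_sanitize_scalar_index_fields_py scalar_index_fields fields_meta → Spec_sanitize_scalar_index_fields_py scalar_index_fields fields_meta (sanitize_scalar_index_fields_py scalar_index_fields fields_meta)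

-- ===== LEMMAS AND PROOFS =====

-- B's successive pruning of the working list equals one filter over the original list
theorem alt_eq_filter (scalar_index_fields : List String) (fields_meta : List (List (String × String))) :
    sanitize_scalar_index_fields_py_alt scalar_index_fields fields_meta =
      scalar_index_fields.filter (fun f =>
        !(fields_meta.any (fun m =>
          pvGet m "FieldType" == some "date_time" && pvGet m "FieldName" == some f))) := by
  unfold sanitize_scalar_index_fields_py_alt
  induction fields_meta generalizing scalar_index_fields with
  | nil => simp
  | cons m ms ih =>
    simp only [List.foldl_cons, List.any_cons, ih]
    split_ifs with h
    · rw [List.filter_filter]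
      refine List.filter_congr (fun f _ => ?_)
      rw [h]
      simp only [Bool.true_and, Bool.not_or]
      rw [Bool.and_comm, BEq.comm]
    · refine List.filter_congr (fun f _ => ?_)
      rw [Bool.eq_iff_iff]
      simp [h]

-- ===== VERDICT (by name: the statement is the Claim_ definition above) =====
theorem sanitize_scalar_index_fields_py_spec : Claim_equal_sanitize_scalar_index_fields_py := by
  intro scalar_index_fields fields_meta _
  unfold Spec_sanitize_scalar_index_fields_py
  rw [alt_eq_filter]
  unfold sanitize_scalar_index_fields_py
  refine (List.filter_congr (fun f _ => ?_)).symm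
  rw [Bool.eq_iff_iff]
  simp [PySem.Set.contains, PySem.Set.mem_ofList, List.mem_filter]
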